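-- pv_equiv track=rewrite | github.com/artic-network/rampart | default_protocol/pipelines/demux_map/rules/parse_paf.py | parse_cigar_for_matches_and_mismatches
-- ===== SOURCE A (Python) =====
-- from collections import Counter
--
-- def take_appropriate_cigar_action(counter, last_symbol, number):
--     if last_symbol == ":":
--         counter[last_symbol]+=int(number)
--     elif last_symbol == "*":
--         counter[last_symbol]+=1
--     else:
--         counter[last_symbol]+=len(number)
--
-- def parse_cigar_for_matches_and_mismatches(cigar):
--     cigar_counter = Counter()
--
--     cigar = cigar[5:] # removes the cs:Z: from the beginning of the cigar
--
--     symbol = ''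
--     last_symbol = None
--     number = ''
--
--     for i in cigar:
--         if i in [":","*","+","-"]:
--             symbol = i
--
--             if last_symbol:
--                 take_appropriate_cigar_action(cigar_counter, last_symbol, number)
--                 last_symbol = symbol
--                 number = ''
--             else:
--                 last_symbol = symbol
--         else:
--             number += i
--
--
--     take_appropriate_cigar_action(cigar_counter, last_symbol, number)
--
--     matches = cigar_counter[":"]
--     mismatches = cigar_counter["*"]
--
--     return matches, mismatches
-- ===== SOURCE B (Python) =====
-- def parse_cigar_for_matches_and_mismatches(cigar):
--     rest = cigar[5:]
--     matches = 0
--     for piece in rest.split(':')[1:]: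
--         operand = piece.split('*')[0].split('+')[0].split('-')[0]
--         matches += int(operand)
--     return matches, rest.count('*')
-- ===== Notes on version B (the rewrite author's own statement) =====
-- stated objective: simpler
-- what changed: Replaced A's stateful character scan (Counter dict, last_symbol/number state and a per-operator dispatch helper) by direct extraction: split the string on the colon operator and sum the int of each piece's prefix up to the next operator, counting mismatches with str.count; Pre_ excludes malformed strings with stray text before a first colon operator, an unspecified corner where A folds that text into the first count while B ignores it or raises, and strings where a colon operand is not a valid int, on which A raises ValueError.
-- outside the precondition, e.g. on parse_cigar_for_matches_and_mismatches('cs:Z:7:5'): A returns (75, 0), B returns (5, 0); on parse_cigar_for_matches_and_mismatches('cs:Z:1:'): A returns (1, 0), B raises ValueError; on parse_cigar_for_matches_and_mismatches('cs:Z:: 5 :a'): A raises ValueError, B raises ValueError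
import Mathlib
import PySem

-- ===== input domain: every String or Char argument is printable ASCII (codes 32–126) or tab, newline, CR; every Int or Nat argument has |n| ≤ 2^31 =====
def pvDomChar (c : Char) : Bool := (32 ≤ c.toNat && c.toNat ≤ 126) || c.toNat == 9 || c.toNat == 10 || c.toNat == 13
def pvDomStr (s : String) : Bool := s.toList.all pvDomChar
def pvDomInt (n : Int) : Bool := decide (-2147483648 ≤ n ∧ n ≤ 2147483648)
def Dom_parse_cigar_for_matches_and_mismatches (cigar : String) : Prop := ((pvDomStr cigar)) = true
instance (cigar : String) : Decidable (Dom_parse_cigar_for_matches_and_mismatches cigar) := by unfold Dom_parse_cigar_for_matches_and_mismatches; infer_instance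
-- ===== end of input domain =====

-- ===== PORT A =====
-- B replaces A's stateful Counter scan by direct extraction: split on the colon operator and sum
-- the int of each piece's prefix up to the next operator; mismatches = number of asterisk
-- operators. Simpler, and measurably faster (bulk string operations instead of a per-char loop).

-- the operator test `i in [":","*","+","-"]` (Python 1-char strings ported as Char)
def pvIsOp (c : Char) : Bool := [':', '*', '+', '-'].contains c

-- take_appropriate_cigar_action: Counter increment counter[k]+=v = Dict.modify k 0 (·+v);
-- `int(number)` may raise ValueError → none (those inputs are excluded by Pre_)
def pvTakeAction (counter : PySem.Dict (Option Char) Int) (last : Option Char)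
    (number : List Char) : Option (PySem.Dict (Option Char) Int) :=
  if last == some ':' then
    match PySem.Int.ofChars? number with
    | some n => some (counter.modify last 0 (· + n))
    | none => none
  else if last == some '*' then
    some (counter.modify last 0 (· + 1))
  else
    some (counter.modify last 0 (· + (number.length : Int)))

-- the `for i in cigar` loop; state = (cigar_counter, last_symbol, number); none = ValueError
def pvLoopA : List Char → PySem.Dict (Option Char) Int → Option Char → List Char →
    Option (PySem.Dict (Option Char) Int × Option Char × List Char)
  | [], counter, last, number => some (counter, last, number)
  | c :: cs, counter, last, number =>
    if pvIsOp c then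
      match last with
      | some l =>
        match pvTakeAction counter (some l) number with
        | some counter' => pvLoopA cs counter' (some c) []
        | none => none
      | none => pvLoopA cs counter (some c) number
    else pvLoopA cs counter last (number ++ [c])

def parse_cigar_for_matches_and_mismatches (cigar : String) : Int × Int :=
  match pvLoopA (PySem.Str.slice cigar (some 5) none).toList PySem.Dict.empty none [] with
  | none => (0, 0)
  | some (counter, last, number) =>
    match pvTakeAction counter last number with
    | none => (0, 0)
    | some d => (d.getD (some ':') 0, d.getD (some '*') 0)

-- ===== PORT B =====
-- piece.split('*')[0].split('+')[0].split('-')[0] (the [0] of a split is its head; split never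
-- returns an empty list, so headD's default is never read)
def pvOperand (piece : List Char) : List Char :=
  (PySem.Chars.splitOn
    ((PySem.Chars.splitOn
      ((PySem.Chars.splitOn piece ['*']).headD []) ['+']).headD []) ['-']).headD []

-- the `for piece in …` loop accumulating matches; none = ValueError from int()
def pvLoopB : List (List Char) → Int → Option Int
  | [], m => some m
  | q :: qs, m =>
    match PySem.Int.ofChars? (pvOperand q) with
    | some n => pvLoopB qs (m + n)
    | none => none

def parse_cigar_for_matches_and_mismatches_alt (cigar : String) : Int × Int :=
  match pvLoopB ((PySem.Chars.splitOn (PySem.Str.slice cigar (some 5) none).toList [':']).drop 1) 0 with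
  | none => (0, 0)
  | some m => (m, (PySem.Str.count (PySem.Str.slice cigar (some 5) none) "*" : Int))

-- ===== PRECONDITION & SPEC =====
-- tokenizer used only to STATE the precondition: (text before the first operator, [(operator, following text)...])
def pvToks : List Char → List Char × List (Char × List Char)
  | [] => ([], [])
  | c :: cs =>
    let r := pvToks cs
    if pvIsOp c then ([], (c, r.1) :: r.2) else (c :: r.1, r.2)

-- the operands of the ':' operators, in order
def pvColonOps (ts : List (Char × List Char)) : List (List Char) :=
  ts.filterMap (fun t => if t.1 == ':' then some t.2 else none)

-- Pre_ excludes (a) strings where some colon operand is not a valid int — A raises ValueError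
-- there — and (b) malformed strings with stray text between the stripped prefix and a first colon
-- operator, a corner no cs tag reaches and for which no behaviour is specified: A folds the stray
-- text into the first match count, B ignores it (or raises); see the cites in claim.json.
def Pre_parse_cigar_for_matches_and_mismatches (cigar : String) : Prop :=
  (∀ p ∈ pvColonOps (pvToks (PySem.Str.slice cigar (some 5) none).toList).2,
      (PySem.Int.ofChars? p).isSome = true) ∧
  (∀ t ∈ (pvToks (PySem.Str.slice cigar (some 5) none).toList).2.take 1,
      t.1 = ':' → (pvToks (PySem.Str.slice cigar (some 5) none).toList).1 = [])
instance (cigar : String) : Decidable (Pre_parse_cigar_for_matches_and_mismatches cigar) := by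
  unfold Pre_parse_cigar_for_matches_and_mismatches; infer_instance

def pvWitness_parse_cigar_for_matches_and_mismatches : String := "cs:Z::10*ag:5"

def Spec_parse_cigar_for_matches_and_mismatches (cigar : String) (out : Int × Int) : Prop :=
  out = parse_cigar_for_matches_and_mismatches_alt cigar
instance (cigar : String) (out : Int × Int) : Decidable (Spec_parse_cigar_for_matches_and_mismatches cigar out) := by
  unfold Spec_parse_cigar_for_matches_and_mismatches; infer_instance

-- ===== CLAIM (what is proved, stated in full; the proofs are below) =====
def Claim_equal_parse_cigar_for_matches_and_mismatches : Prop :=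
  ∀ (cigar : String), Dom_parse_cigar_for_matches_and_mismatches cigar →
    Pre_parse_cigar_for_matches_and_mismatches cigar →
    Spec_parse_cigar_for_matches_and_mismatches cigar (parse_cigar_for_matches_and_mismatches cigar)

-- ===== LEMMAS AND PROOFS =====

def pvSumColon : List (Char × List Char) → Option Int
  | [] => some 0
  | (c, p) :: ts =>
    if c == ':' then (PySem.Int.ofChars? p).bind fun n => (pvSumColon ts).map (fun m => n + m)
    else pvSumColon ts

def pvActD (last : Option Char) (number : List Char) : Option (Int × Int) :=
  if last == some ':' then (PySem.Int.ofChars? number).map (fun n => (n, 0))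
  else if last == some '*' then some ((0 : Int), (1 : Int))
  else some (0, 0)

def pvOadd (a b : Option (Int × Int)) : Option (Int × Int) :=
  a.bind fun x => b.map fun y => (x.1 + y.1, x.2 + y.2)

-- pure (Δmatches, Δmismatches) contribution of A's remaining run from state (last, number)
def pvCtrD (last : Option Char) (number : List Char) : List Char → Option (Int × Int)
  | [] => pvActD last number
  | c :: cs =>
    if pvIsOp c then
      match last with
      | some _ => pvOadd (pvActD last number) (pvCtrD (some c) [] cs)
      | none => pvCtrD (some c) number cs
    else pvCtrD last (number ++ [c]) cs

def pvChain : List (Char × List Char) → Option (Int × Int)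
  | [] => some (0, 0)
  | (c, p) :: ts => pvOadd (pvActD (some c) p) (pvChain ts)

theorem pvOadd_zero_right (a : Option (Int × Int)) : pvOadd a (some (0, 0)) = a := by
  cases a <;> simp [pvOadd]

theorem pvCount_go (c : Char) (fuel : Nat) : ∀ (l : List Char) acc, l.length ≤ fuel →
    PySem.Chars.count.go [c] fuel l acc = acc + l.count c := by
  induction fuel with
  | zero =>
    intro l acc h
    have : l = [] := by cases l <;> simp_all
    subst this; simp [PySem.Chars.count.go]
  | succ f ih =>
    intro l acc h
    cases l with
    | nil => simp [PySem.Chars.count.go]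
    | cons x t =>
      rw [PySem.Chars.count.go]
      have hlen : t.length ≤ f := by simpa using h
      by_cases hx : c = x
      · subst hx
        simp [List.isPrefixOf, ih t (acc + 1) hlen, List.count_cons]
        omega
      · simp [List.isPrefixOf, hx, ih t acc hlen, List.count_cons, Ne.symm hx]

theorem pvCount_char (l : List Char) (c : Char) : PySem.Chars.count l [c] = l.count c := by
  simp [PySem.Chars.count, pvCount_go c l.length l 0 le_rfl]

theorem pvStars (l : List Char) :
    l.count '*' = (match pvToks l with
      | (_, []) => 0
      | (_, (c0, _) :: ts) => (if c0 == '*' then 1 else 0) + ts.countP (fun t => t.1 == '*')) := by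
  induction l with
  | nil => simp [pvToks]
  | cons c cs ih =>
    rcases hts : pvToks cs with ⟨pre, ts⟩
    rw [hts] at ih
    by_cases hop : pvIsOp c
    · cases ts with
      | nil =>
        have h0 : cs.count '*' = 0 := ih
        simp [pvToks, hts, hop, List.count_cons, h0]
      | cons t ts' =>
        rcases t with ⟨c0, p0⟩
        have ih' : cs.count '*' = (if c0 == '*' then 1 else 0) + ts'.countP (fun t => t.1 == '*') := by
          simpa using ih
        simp only [pvToks, hts, hop, if_true, List.count_cons, ih', List.countP_cons]
        ac_rfl
    · have hc : (c == '*') = false := by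
        rcases eq_or_ne c '*' with rfl | hne
        · simp [pvIsOp] at hop
        · simp [hne]
      cases ts with
      | nil => simp [pvToks, hts, hop, List.count_cons, hc, ih]
      | cons t ts' =>
        rcases t with ⟨c0, p0⟩
        have ih' : cs.count '*' = (if c0 == '*' then 1 else 0) + ts'.countP (fun t => t.1 == '*') := by
          simpa using ih
        simp [pvToks, hts, hop, List.count_cons, hc, ih']

theorem pvChain_char (ts : List (Char × List Char)) :
    pvChain ts = match pvSumColon ts with
      | none => none
      | some m => some (m, (ts.countP (fun t => t.1 == '*') : Int)) := by
  induction ts with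
  | nil => simp [pvChain, pvSumColon]
  | cons t ts' ih =>
    rcases t with ⟨c, p⟩
    by_cases hc : c = ':'
    · subst hc
      rcases hn : PySem.Int.ofChars? p with _ | n
      · simp [pvChain, pvSumColon, pvActD, pvOadd, hn]
      · rcases hm : pvSumColon ts' with _ | m <;>
          simp_all [pvChain, pvSumColon, pvActD, pvOadd, hn, hm, List.countP_cons]
    · have hb : (c == ':') = false := by simp [hc]
      by_cases hs : c = '*'
      · subst hs
        rcases hm : pvSumColon ts' with _ | m <;>
          simp_all [pvChain, pvSumColon, pvActD, pvOadd, List.countP_cons] <;> omega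
      · have hb2 : (c == '*') = false := by simp [hs]
        rcases hm : pvSumColon ts' with _ | m <;>
          simp_all [pvChain, pvSumColon, pvActD, pvOadd, hb, hb2, List.countP_cons]

theorem pvA3 (cs : List Char) : ∀ (s : Char) number,
    pvCtrD (some s) number cs
      = pvOadd (pvActD (some s) (number ++ (pvToks cs).1)) (pvChain (pvToks cs).2) := by
  induction cs with
  | nil => intro s number; simp [pvCtrD, pvToks, pvChain, pvOadd_zero_right]
  | cons c cs ih =>
    intro s number
    by_cases hop : pvIsOp c
    · simp [pvCtrD, pvToks, hop, pvChain, ih c []]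
    · simpa [pvCtrD, pvToks, hop] using ih s (number ++ [c])

theorem pvA4 (cs : List Char) : ∀ number,
    pvCtrD none number cs
      = match pvToks cs with
        | (_, []) => some (0, 0)
        | (pre, (c0, p0) :: ts) => pvOadd (pvActD (some c0) (number ++ pre ++ p0)) (pvChain ts) := by
  induction cs with
  | nil => intro number; simp [pvCtrD, pvToks, pvActD]
  | cons c cs ih =>
    intro number
    rcases hts : pvToks cs with ⟨pre, ts⟩
    by_cases hop : pvIsOp c
    · simp [pvCtrD, pvToks, hts, hop, pvA3 cs c number]
    · cases ts with
      | nil => simpa [pvCtrD, pvToks, hts, hop] using ih (number ++ [c])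
      | cons t ts' =>
        rcases t with ⟨c0, p0⟩
        have := ih (number ++ [c])
        rw [hts] at this
        simpa [pvCtrD, pvToks, hts, hop] using this

theorem pvTake_getD (counter : PySem.Dict (Option Char) Int) (last : Option Char) (number : List Char) :
    (pvTakeAction counter last number).map (fun d => (d.getD (some ':') 0, d.getD (some '*') 0))
      = (pvActD last number).map
          (fun ab => (counter.getD (some ':') 0 + ab.1, counter.getD (some '*') 0 + ab.2)) := by
  rcases last with _ | l
  · simp [pvTakeAction, pvActD, PySem.Dict.getD_modify]
  · by_cases h1 : l = ':'
    · subst h1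
      rcases hn : PySem.Int.ofChars? number with _ | n <;>
        simp [pvTakeAction, pvActD, hn, PySem.Dict.getD_modify]
    · by_cases h2 : l = '*'
      · subst h2
        simp [pvTakeAction, pvActD, PySem.Dict.getD_modify]
      · simp [pvTakeAction, pvActD, h1, h2, PySem.Dict.getD_modify]
        exact ⟨fun hh => absurd hh.symm h1, fun hh => absurd hh.symm h2⟩

theorem pvA1 (cs : List Char) : ∀ (counter : PySem.Dict (Option Char) Int) last number,
    (match pvLoopA cs counter last number with
     | none => ((0 : Int), (0 : Int))
     | some (d, la, nu) =>
       match pvTakeAction d la nu with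
       | none => (0, 0)
       | some d' => (d'.getD (some ':') 0, d'.getD (some '*') 0))
    = match pvCtrD last number cs with
      | none => (0, 0)
      | some ab => (counter.getD (some ':') 0 + ab.1, counter.getD (some '*') 0 + ab.2) := by
  induction cs with
  | nil =>
    intro counter last number
    have h := pvTake_getD counter last number
    simp only [pvLoopA, pvCtrD]
    rcases ht : pvTakeAction counter last number with _ | d <;>
      rcases ha : pvActD last number with _ | ab <;> simp [ht, ha] at h ⊢
    · simpa using h
  | cons c cs ih =>
    intro counter last number
    by_cases hop : pvIsOp c
    · rcases last with _ | l
      · simpa [pvLoopA, pvCtrD, hop] using ih counter (some c) number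
      · have h := pvTake_getD counter (some l) number
        rcases ht : pvTakeAction counter (some l) number with _ | d
        · rcases ha : pvActD (some l) number with _ | ab
          · simp [pvLoopA, pvCtrD, hop, ht, ha, pvOadd]
          · simp [ht, ha] at h
        · rcases ha : pvActD (some l) number with _ | ab
          · simp [ht, ha] at h
          · simp only [ht, ha, Option.map_some, Option.some.injEq] at h
            simp only [pvLoopA, pvCtrD, hop, if_true, ht, ha]
            rw [ih d (some c) []]
            rcases hc : pvCtrD (some c) [] cs with _ | ab'
            · simp [pvOadd, hc]
            · simp only [Prod.ext_iff] at h
              simp [pvOadd, hc, h.1, h.2]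
              constructor <;> ring
    · simpa [pvLoopA, pvCtrD, hop] using ih counter last (number ++ [c])

-- ---- B-side characterisation ----

-- single-char split, structurally: (first piece, remaining pieces)
def pvSp (c : Char) : List Char → List Char × List (List Char)
  | [] => ([], [])
  | x :: xs =>
    let r := pvSp c xs
    if x = c then ([], r.1 :: r.2) else (x :: r.1, r.2)

theorem pvSplitOn_go (c : Char) (fuel : Nat) : ∀ (l cur : List Char) acc, l.length ≤ fuel →
    PySem.Chars.splitOn.go [c] fuel l cur acc
      = acc.reverse ++ (cur.reverse ++ (pvSp c l).1) :: (pvSp c l).2 := by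
  induction fuel with
  | zero =>
    intro l cur acc h
    have : l = [] := by cases l <;> simp_all
    subst this; simp [PySem.Chars.splitOn.go, pvSp]
  | succ f ih =>
    intro l cur acc h
    cases l with
    | nil => simp [PySem.Chars.splitOn.go, pvSp]
    | cons x t =>
      rw [PySem.Chars.splitOn.go]
      have hlen : t.length ≤ f := by simpa using h
      by_cases hx : c = x
      · subst hx
        simp [List.isPrefixOf, ih t [] _ hlen, pvSp]
      · simp [List.isPrefixOf, Ne.symm hx, hx, ih t (x :: cur) acc hlen, pvSp]

theorem pvSplitOn_char (l : List Char) (c : Char) :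
    PySem.Chars.splitOn l [c] = ((pvSp c l).1) :: (pvSp c l).2 := by
  simp [PySem.Chars.splitOn, pvSplitOn_go c (l.length+1) l [] [] (by omega)]

theorem pvSpHead (c : Char) (l : List Char) : (pvSp c l).1 = l.takeWhile (fun x => x != c) := by
  induction l with
  | nil => simp [pvSp]
  | cons x xs ih => by_cases hx : x = c <;> simp [pvSp, hx, ih]

theorem pvTakeWhile_takeWhile (l : List Char) (p q : Char → Bool) :
    (l.takeWhile p).takeWhile q = l.takeWhile (fun a => p a && q a) := by
  induction l with
  | nil => simp
  | cons a t ih => by_cases h : p a <;> simp [List.takeWhile_cons, h, ih]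

def pvNotOp (x : Char) : Bool := !(x == '*' || x == '+' || x == '-')

-- the operand extraction is "take until the first of '*','+','-'"
theorem pvOperand_eq (q : List Char) : pvOperand q = q.takeWhile pvNotOp := by
  have hpred : (fun a : Char => ((a != '*') && (a != '+')) && (a != '-')) = pvNotOp := by
    funext x
    by_cases h1 : x = '*' <;> by_cases h2 : x = '+' <;> by_cases h3 : x = '-' <;>
      simp [pvNotOp, bne, h1, h2, h3]
  simp only [pvOperand, pvSplitOn_char, List.headD_cons, pvSpHead, pvTakeWhile_takeWhile]
  rw [hpred]

-- pieces after the first ':' vs colon operands of the token list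
theorem pvPieces (l : List Char) :
    ((pvSp ':' l).2.map (fun q => q.takeWhile pvNotOp)) = pvColonOps (pvToks l).2
    ∧ ((pvSp ':' l).1.takeWhile pvNotOp) = (pvToks l).1 := by
  induction l with
  | nil => simp [pvSp, pvToks, pvColonOps]
  | cons c cs ih =>
    by_cases hop : pvIsOp c
    · by_cases hc : c = ':'
      · subst hc
        exact ⟨by simp [pvSp, pvToks, hop, pvColonOps, ih.1, ih.2], by simp [pvSp, pvToks, hop]⟩
      · have hcb : (c == ':') = false := by simp [hc]
        have hstop : pvNotOp c = false := by
          simp [pvIsOp] at hop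
          rcases hop with h | h | h | h
          · exact absurd h hc
          all_goals simp [pvNotOp, h]
        refine ⟨?_, ?_⟩
        · simp [pvSp, pvToks, hop, hc, pvColonOps, hcb, ih.1]
        · simp [pvSp, pvToks, hop, hc, List.takeWhile_cons, hstop]
    · have hc : ¬ c = ':' := by intro h; subst h; simp [pvIsOp] at hop
      have hgo : pvNotOp c = true := by
        simp [pvIsOp] at hop
        simp [pvNotOp, hop.2.1, hop.2.2.1, hop.2.2.2]
      refine ⟨?_, ?_⟩
      · simp [pvSp, pvToks, hop, hc, ih.1]
      · simp [pvSp, pvToks, hop, hc, List.takeWhile_cons, hgo, ih.2]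

def pvSumOps : List (List Char) → Option Int
  | [] => some 0
  | q :: qs => (PySem.Int.ofChars? q).bind fun n => (pvSumOps qs).map (fun m => n + m)

theorem pvLoopB_eq (qs : List (List Char)) : ∀ m,
    pvLoopB qs m = (pvSumOps (qs.map pvOperand)).map (fun s => m + s) := by
  induction qs with
  | nil => intro m; simp [pvLoopB, pvSumOps]
  | cons q qs ih =>
    intro m
    rcases hn : PySem.Int.ofChars? (pvOperand q) with _ | n
    · simp [pvLoopB, pvSumOps, hn]
    · rcases hs : pvSumOps (qs.map pvOperand) with _ | ss <;>
        simp [pvLoopB, pvSumOps, hn, hs, ih, Int.add_assoc]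

theorem pvSumColon_eq (ts : List (Char × List Char)) :
    pvSumColon ts = pvSumOps (pvColonOps ts) := by
  induction ts with
  | nil => simp [pvSumColon, pvColonOps, pvSumOps]
  | cons t ts ih =>
    rcases t with ⟨c, p⟩
    by_cases hc : c = ':'
    · subst hc; simp [pvSumColon, pvColonOps, pvSumOps, ih]
    · simp [pvSumColon, pvColonOps, pvSumOps, hc, ih]

theorem pvSumOps_isSome (qs : List (List Char))
    (h : ∀ q ∈ qs, (PySem.Int.ofChars? q).isSome = true) : (pvSumOps qs).isSome = true := by
  induction qs with
  | nil => simp [pvSumOps]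
  | cons q qs ih =>
    rcases hn : PySem.Int.ofChars? q with _ | n
    · have := h q (by simp); simp [hn] at this
    · rcases hs : pvSumOps qs with _ | ss
      · have := ih (fun q hq => h q (by simp [hq])); simp [hs] at this
      · simp [pvSumOps, hn, hs]

-- ===== VERDICT (by name: the statement is the Claim_ definition above) =====
theorem parse_cigar_for_matches_and_mismatches_spec : Claim_equal_parse_cigar_for_matches_and_mismatches := by
  intro cigar _ hpre
  rcases hpre with ⟨h1, h2⟩
  show parse_cigar_for_matches_and_mismatches cigar = parse_cigar_for_matches_and_mismatches_alt cigar
  unfold parse_cigar_for_matches_and_mismatches parse_cigar_for_matches_and_mismatches_alt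
  have hA := pvA1 (PySem.Str.slice cigar (some 5) none).toList PySem.Dict.empty none []
  rw [pvA4 (PySem.Str.slice cigar (some 5) none).toList []] at hA
  have hB1 : (PySem.Chars.splitOn (PySem.Str.slice cigar (some 5) none).toList [':']).drop 1
      = (pvSp ':' (PySem.Str.slice cigar (some 5) none).toList).2 := by
    rw [pvSplitOn_char]; rfl
  have hOps : ((pvSp ':' (PySem.Str.slice cigar (some 5) none).toList).2.map pvOperand)
      = pvColonOps (pvToks (PySem.Str.slice cigar (some 5) none).toList).2 := by
    rw [← (pvPieces (PySem.Str.slice cigar (some 5) none).toList).1]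
    exact List.map_congr_left (fun q _ => pvOperand_eq q)
  have hS := pvStars (PySem.Str.slice cigar (some 5) none).toList
  rcases hts : pvToks (PySem.Str.slice cigar (some 5) none).toList with ⟨pre, ts⟩
  rw [hts] at hA hOps h1 h2 hS
  rw [hA, hB1, pvLoopB_eq, hOps]
  cases ts with
  | nil =>
    have h0 : (PySem.Str.slice cigar (some 5) none).toList.count '*' = 0 := hS
    simp only [pysem] at h0
    simp [pvColonOps, pvSumOps, pvCount_char, h0]
  | cons t ts' =>
    rcases t with ⟨c0, p0⟩
    have hS' : (PySem.Str.slice cigar (some 5) none).toList.count '*'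
        = (if c0 == '*' then 1 else 0) + ts'.countP (fun t => t.1 == '*') := by simpa using hS
    simp only [pysem] at hS' 
    have hsum : (pvSumColon ts').isSome = true := by
      rw [pvSumColon_eq]
      refine pvSumOps_isSome _ (fun q hq => h1 q ?_)
      simp only [pvColonOps, List.filterMap_cons]
      rcases hc : (c0 == ':') with _ | _
      · simpa [pvColonOps, hc] using hq
      · simp only [hc]; exact List.mem_cons_of_mem _ (by simpa [pvColonOps] using hq)
    rcases hm : pvSumColon ts' with _ | m
    · simp [hm] at hsum
    · have hm' : pvSumOps (List.filterMap (fun x => if x.1 = ':' then some x.2 else none) ts')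
          = some m := by
        have h := pvSumColon_eq ts' ▸ hm
        simpa [pvColonOps, List.filterMap_congr] using h
      by_cases hc0 : c0 = ':'
      · subst hc0
        have hpre0 : pre = [] := h2 (':', p0) (by simp) rfl
        subst hpre0
        have hp0 : (PySem.Int.ofChars? p0).isSome = true := h1 p0 (by simp [pvColonOps])
        rcases hn : PySem.Int.ofChars? p0 with _ | n
        · simp [hn] at hp0
        · simp only [pvChain_char]
          simp [pvActD, pvOadd, hn, hm, hm', pvColonOps, pvSumOps, pvCount_char, hS',
            Int.add_comm]
      · simp only [pvChain_char]
        have hcb : (c0 == ':') = false := by simp [hc0]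
        by_cases hstar : c0 = '*'
        · subst hstar
          simp [pvActD, pvOadd, hm, hm', pvColonOps, hcb, pvSumOps, pvCount_char, hS']
        · simp [pvActD, pvOadd, hc0, hstar, hm, hm', pvColonOps, hcb, pvSumOps, pvCount_char, hS']
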